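-- pv_equiv track=rewrite | github.com/ghawkes1217/Conjectures-and-Computations | c-grothendieck/c-grothendieck-strongest.py | colreq
-- ===== SOURCE A (Python) =====
-- import copy
--
-- def colreq(b,a):
--     if len(a)<=len(b):
--         return(False)
--     B=copy.copy(b)
--     A=copy.copy(a)
--     for i in range(0,len(B)):
--         if B[i]==min(B):
--             bindex=i
--     for i in range(0,bindex+1):
--         B[i]=-B[i]
--     for i in range(0,len(A)):
--         if A[i]==min(A):
--             aindex=i
--     for i in range(0,aindex):
--         A[i]=-A[i]
--
--     if abs(B[len(B)-1])>=abs(A[0]):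
--         return(False)
--     if abs(B[0])>=abs(A[0]):
--         return(False)
--
--     for i in range(0,len(B)):
--         if A[i+1]>B[i]:
--             for j in range(i+1,len(B)):
--                 if B[i]  < B[j]  < A[i+1]   or   B[i] <  -B[j] <   A[i+1]:
--                     return(False)
--                 if B[j]==A[i+1] or B[j]==-A[i+1]:
--                     return(False)
--
--             for k in range(0,i+1):
--                 if B[i]  < A[k]  < A[i+1]   or   B[i] <  -A[k] <   A[i+1]:
--                     return(False)
--                 if A[k]==-A[i+1] or A[k]==A[i+1]:
--                     return(False)
--     return(True)
-- ===== SOURCE B (Python) =====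
-- def colreq(b, a):
--     if len(a) <= len(b):
--         return False
--     n = len(b)
--     mb = min(b)
--     bindex = next(i for i in reversed(range(n)) if b[i] == mb)
--     B = [-x if i <= bindex else x for i, x in enumerate(b)]
--     ma = min(a)
--     aindex = next(i for i in reversed(range(len(a))) if a[i] == ma)
--     A = [-x if i < aindex else x for i, x in enumerate(a)]
--     if abs(B[n - 1]) >= abs(A[0]) or abs(B[0]) >= abs(A[0]):
--         return False
--     # pool of candidate values: +/-B[j] for j > i, +/-A[k] for k <= i, updated as i advances
--     S = [s * B[j] for j in range(1, n) for s in (1, -1)] + [A[0], -A[0]]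
--     for i in range(n):
--         lo, hi = B[i], A[i + 1]
--         if any(lo < v <= hi for v in S):
--             return False
--         if i + 1 < n:
--             S.remove(B[i + 1])
--             S.remove(-B[i + 1])
--         S.append(A[i + 1])
--         S.append(-A[i + 1])
--     return True
-- ===== Notes on version B (the rewrite author's own statement) =====
-- stated objective: faster
-- what changed: B computes each minimum once and replaces the two four-comparison inner scans by a single candidate pool (the values +/-B[j] for j>i and +/-A[k] for k<=i) maintained incrementally as i advances and queried with one interval-membership test B[i] < v <= A[i+1].
import Mathlib
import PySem

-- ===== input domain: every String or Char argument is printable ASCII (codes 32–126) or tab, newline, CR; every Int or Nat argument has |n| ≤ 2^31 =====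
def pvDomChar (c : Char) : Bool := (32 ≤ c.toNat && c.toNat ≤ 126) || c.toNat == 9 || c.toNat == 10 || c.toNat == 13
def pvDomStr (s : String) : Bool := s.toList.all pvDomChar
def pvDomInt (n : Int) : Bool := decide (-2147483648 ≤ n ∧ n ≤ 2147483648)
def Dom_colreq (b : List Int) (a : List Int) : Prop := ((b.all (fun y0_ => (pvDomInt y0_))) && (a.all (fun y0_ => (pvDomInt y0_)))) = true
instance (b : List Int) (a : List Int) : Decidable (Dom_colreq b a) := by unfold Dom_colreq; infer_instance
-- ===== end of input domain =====

-- B replaces A's per-index min recomputation and the two four-way inner scans by a single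
-- incrementally maintained candidate pool queried for membership in one interval (objective: faster).

-- ===== PORT A =====
def colreq (b : List Int) (a : List Int) : Bool :=
  if a.length ≤ b.length then false
  else
    -- for i in range(len(B)): if B[i]==min(B): bindex=i   (min recomputed each iteration, as in A)
    let bindex : Nat := (List.range b.length).foldl
      (fun acc i => if b.getD i 0 = (PySem.List.min? b (fun x => x)).getD 0 then i else acc) 0
    -- for i in range(bindex+1): B[i] = -B[i]
    let B := (List.range (bindex + 1)).foldl (fun l i => l.set i (-(l.getD i 0))) b
    let aindex : Nat := (List.range a.length).foldl
      (fun acc i => if a.getD i 0 = (PySem.List.min? a (fun x => x)).getD 0 then i else acc) 0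
    let A := (List.range aindex).foldl (fun l i => l.set i (-(l.getD i 0))) a
    if |B.getD (B.length - 1) 0| ≥ |A.getD 0 0| then false
    else if |B.getD 0 0| ≥ |A.getD 0 0| then false
    else
      (List.range B.length).all (fun i =>
        if A.getD (i+1) 0 > B.getD i 0 then
          ((List.range' (i+1) (B.length - (i+1))).all (fun j =>
            !(decide (B.getD i 0 < B.getD j 0 ∧ B.getD j 0 < A.getD (i+1) 0) ||
              decide (B.getD i 0 < -(B.getD j 0) ∧ -(B.getD j 0) < A.getD (i+1) 0) ||
              decide (B.getD j 0 = A.getD (i+1) 0) || decide (B.getD j 0 = -(A.getD (i+1) 0)))))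
          &&
          ((List.range (i+1)).all (fun k =>
            !(decide (B.getD i 0 < A.getD k 0 ∧ A.getD k 0 < A.getD (i+1) 0) ||
              decide (B.getD i 0 < -(A.getD k 0) ∧ -(A.getD k 0) < A.getD (i+1) 0) ||
              decide (A.getD k 0 = -(A.getD (i+1) 0)) || decide (A.getD k 0 = A.getD (i+1) 0))))
        else true)

-- ===== PORT B =====
-- the for-loop of Source B over i, carrying the candidate pool S; remove? never misses on inputs satisfying Pre_
def loopB (B A : List Int) (n : Nat) (i : Nat) (S : List Int) : Bool :=
  if i < n then
    if S.any (fun v => decide (B.getD i 0 < v) && decide (v ≤ A.getD (i+1) 0)) then false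
    else
      let S1 := if i + 1 < n then (PySem.List.remove? S (B.getD (i+1) 0)).getD S else S
      let S2 := if i + 1 < n then (PySem.List.remove? S1 (-(B.getD (i+1) 0))).getD S1 else S1
      loopB B A n (i+1) (S2 ++ [A.getD (i+1) 0, -(A.getD (i+1) 0)])
  else true
termination_by n - i

def colreq_alt (b : List Int) (a : List Int) : Bool :=
  if a.length ≤ b.length then false
  else
    let n := b.length
    let mb := (PySem.List.min? b (fun x => x)).getD 0
    let bindex : Nat := (((List.range n).reverse).find? (fun i => b.getD i 0 = mb)).getD 0
    let B := (PySem.List.enumerate b).map (fun p => if p.1 ≤ (bindex : Int) then -p.2 else p.2)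
    let ma := (PySem.List.min? a (fun x => x)).getD 0
    let aindex : Nat := (((List.range a.length).reverse).find? (fun i => a.getD i 0 = ma)).getD 0
    let A := (PySem.List.enumerate a).map (fun p => if p.1 < (aindex : Int) then -p.2 else p.2)
    if |B.getD (n - 1) 0| ≥ |A.getD 0 0| || |B.getD 0 0| ≥ |A.getD 0 0| then false
    else
      let S0 := (List.range' 1 (n - 1)).flatMap (fun j => [B.getD j 0, -(B.getD j 0)])
                  ++ [A.getD 0 0, -(A.getD 0 0)]
      loopB B A n 0 S0

-- ===== PRECONDITION & SPEC =====
-- Pre_ excludes only b = [] with a ≠ [], where A raises (UnboundLocalError on bindex) and Source B raises too (min of empty list).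
def Pre_colreq (b : List Int) (a : List Int) : Prop := b = [] → a = []
instance (b : List Int) (a : List Int) : Decidable (Pre_colreq b a) := by unfold Pre_colreq; infer_instance
def pvWitness_colreq : List Int × List Int := ([1], [0, 2])
def Spec_colreq (b : List Int) (a : List Int) (out : Bool) : Prop := out = colreq_alt b a
instance (b : List Int) (a : List Int) (out : Bool) : Decidable (Spec_colreq b a out) := by unfold Spec_colreq; infer_instance

-- ===== CLAIM (what is proved, stated in full; the proofs are below) =====
def Claim_equal_colreq : Prop := ∀ (b : List Int) (a : List Int), Dom_colreq b a → Pre_colreq b a → Spec_colreq b a (colreq b a)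

-- ===== LEMMAS AND PROOFS =====

theorem lastIdx_eq (P : Nat → Prop) [DecidablePred P] (n : Nat) :
    (List.range n).foldl (fun acc i => if P i then i else acc) 0
      = (((List.range n).reverse).find? (fun i => decide (P i))).getD 0 := by
  induction n with
  | zero => simp
  | succ n ih =>
    rw [List.range_succ, List.foldl_append, List.reverse_append]
    simp only [List.foldl_cons, List.foldl_nil, List.reverse_cons, List.reverse_nil,
      List.nil_append]
    by_cases h : P n <;> simp [h, ih]

def negFold (l : List Int) (k : Nat) : List Int :=
  (List.range k).foldl (fun l i => l.set i (-(l.getD i 0))) l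

theorem negFold_succ (l : List Int) (k : Nat) :
    negFold l (k+1) = (negFold l k).set k (-((negFold l k).getD k 0)) := by
  unfold negFold; rw [List.range_succ, List.foldl_append]; rfl

theorem negFold_length (l : List Int) (k : Nat) : (negFold l k).length = l.length := by
  induction k with
  | zero => rfl
  | succ k ih => rw [negFold_succ, List.length_set, ih]

theorem negFold_getElem? (l : List Int) (k j : Nat) :
    (negFold l k)[j]? = if h : j < l.length then some (if j < k then -(l[j]) else l[j]) else none := by
  induction k generalizing j with
  | zero =>
    show l[j]? = _
    split <;> simp_all
  | succ k ih =>
    rw [negFold_succ, List.getElem?_set, negFold_length]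
    by_cases hj : j < l.length
    · by_cases hjk : k = j
      · have hgd : (negFold l k).getD k 0 = if k < k then -(l[j]) else l[j] := by
          rw [List.getD_eq_getElem?_getD, ih k, hjk]; simp [hj]
        rw [hjk] at hgd ⊢
        simp only [hj, if_true, hgd]
        simp
      · rw [ih j]; simp [hj, hjk]
        omega
    · simp [hj, ih, negFold_length]
      omega

theorem enumMap_getElem? (l : List Int) (s : Int) (f : Int × Int → Int) (j : Nat) :
    ((PySem.List.enumerate l s).map f)[j]? =
      if h : j < l.length then some (f (s + j, l[j])) else none := by
  induction l generalizing s j with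
  | nil => simp [PySem.List.enumerate_nil]
  | cons x t ih =>
    rw [PySem.List.enumerate_cons]
    cases j with
    | zero => simp
    | succ j =>
      simp only [List.map_cons, List.getElem?_cons_succ, ih, List.length_cons]
      split <;> [skip; (split <;> [omega; rfl])]
      · rename_i h; rw [dif_pos (by omega)]
        simp only [List.getElem_cons_succ]
        have : s + 1 + (j:Int) = s + ((j:Nat)+1 : Nat) := by push_cast; ring
        rw [this]

theorem negFold_eq_enumMap (l : List Int) (k : Nat) :
    negFold l k = (PySem.List.enumerate l).map (fun p => if p.1 < (k : Int) then -p.2 else p.2) := by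
  apply List.ext_getElem?
  intro j
  rw [negFold_getElem?, enumMap_getElem?]
  split
  · rename_i h
    by_cases hjk : j < k
    · simp only [hjk, if_true]
      rw [if_pos (by omega)]
    · simp only [hjk, if_false]
      rw [if_neg (by omega)]
  · rfl

theorem negFold_eq_enumMap_le (l : List Int) (c : Nat) :
    negFold l (c+1) = (PySem.List.enumerate l).map (fun p => if p.1 ≤ (c : Int) then -p.2 else p.2) := by
  rw [negFold_eq_enumMap]
  congr 1
  funext p
  push_cast
  simp only [Int.lt_add_one_iff]

def pool (B A : List Int) (n i : Nat) : List Int :=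
  (List.range' (i+1) (n-(i+1))).flatMap (fun j => [B.getD j 0, -(B.getD j 0)])
    ++ (List.range (i+1)).flatMap (fun k => [A.getD k 0, -(A.getD k 0)])

-- A's per-i body
def bodyA (B A : List Int) (n : Nat) (i : Nat) : Bool :=
  if A.getD (i+1) 0 > B.getD i 0 then
    ((List.range' (i+1) (n - (i+1))).all (fun j =>
      !(decide (B.getD i 0 < B.getD j 0 ∧ B.getD j 0 < A.getD (i+1) 0) ||
        decide (B.getD i 0 < -(B.getD j 0) ∧ -(B.getD j 0) < A.getD (i+1) 0) ||
        decide (B.getD j 0 = A.getD (i+1) 0) || decide (B.getD j 0 = -(A.getD (i+1) 0)))))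
    &&
    ((List.range (i+1)).all (fun k =>
      !(decide (B.getD i 0 < A.getD k 0 ∧ A.getD k 0 < A.getD (i+1) 0) ||
        decide (B.getD i 0 < -(A.getD k 0) ∧ -(A.getD k 0) < A.getD (i+1) 0) ||
        decide (A.getD k 0 = -(A.getD (i+1) 0)) || decide (A.getD k 0 = A.getD (i+1) 0))))
  else true

theorem any_congr_local {α : Type} (l : List α) (p q : α → Bool) (h : ∀ x ∈ l, p x = q x) :
    l.any p = l.any q := by
  induction l with
  | nil => rfl
  | cons x t ih =>
    simp only [List.any_cons, h x (List.mem_cons_self), ih (fun y hy => h y (List.mem_cons_of_mem _ hy))]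

theorem bodyA_eq_pool (B A : List Int) (n i : Nat) :
    bodyA B A n i =
      !((pool B A n i).any (fun v => decide (B.getD i 0 < v) && decide (v ≤ A.getD (i+1) 0))) := by
  by_cases hlt : B.getD i 0 < A.getD (i+1) 0
  · rw [bodyA, if_pos hlt]
    unfold pool
    rw [List.any_append, List.any_flatMap, List.any_flatMap, Bool.not_or]
    congr 1
    · rw [← List.not_any_eq_all_not]
      congr 1
      apply any_congr_local
      intro j _
      rw [Bool.eq_iff_iff]
      simp only [List.any_cons, List.any_nil, Bool.or_eq_true, Bool.and_eq_true,
        decide_eq_true_eq, Bool.or_false]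
      omega
    · rw [← List.not_any_eq_all_not]
      congr 1
      apply any_congr_local
      intro k _
      rw [Bool.eq_iff_iff]
      simp only [List.any_cons, List.any_nil, Bool.or_eq_true, Bool.and_eq_true,
        decide_eq_true_eq, Bool.or_false]
      omega
  · rw [bodyA, if_neg hlt]
    have : (pool B A n i).any (fun v => decide (B.getD i 0 < v) && decide (v ≤ A.getD (i+1) 0)) = false := by
      rw [List.any_eq_false]
      intro v _
      simp only [Bool.and_eq_true, decide_eq_true_eq, not_and]
      omega
    rw [this]
    rfl

theorem loopB_eq (B A : List Int) (n : Nat) :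
    ∀ (fuel i : Nat) (S : List Int), fuel = n - i → i ≤ n → S.Perm (pool B A n i) →
      loopB B A n i S = (List.range' i (n - i)).all (bodyA B A n) := by
  intro fuel
  induction fuel with
  | zero =>
    intro i S hf hle _
    have hin : i = n := by omega
    rw [loopB, if_neg (by omega)]
    rw [show n - i = 0 from by omega]
    rfl
  | succ fuel ih =>
    intro i S hf hle hperm
    have hlt : i < n := by omega
    rw [loopB, if_pos hlt]
    rw [hperm.any_eq]
    rw [show n - i = fuel + 1 from by omega, List.range'_succ, List.all_cons, bodyA_eq_pool]
    by_cases hany : (pool B A n i).any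
        (fun v => decide (B.getD i 0 < v) && decide (v ≤ A.getD (i+1) 0)) = true
    · rw [hany]; simp
    · rw [Bool.not_eq_true] at hany
      rw [hany]
      simp only [Bool.not_false, Bool.true_and]
      -- the updated pool is a permutation of pool (i+1)
      by_cases hstep : i + 1 < n
      · have hsplit : pool B A n i
            = B.getD (i+1) 0 :: -(B.getD (i+1) 0)
              :: ((List.range' (i+2) (n-(i+2))).flatMap (fun j => [B.getD j 0, -(B.getD j 0)])
                  ++ (List.range (i+1)).flatMap (fun k => [A.getD k 0, -(A.getD k 0)])) := by
          rw [pool, show n - (i+1) = (n - (i+2)) + 1 from by omega, List.range'_succ]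
          simp [List.flatMap_cons]
        have hB1 : B.getD (i+1) 0 ∈ S := by
          rw [hperm.mem_iff, hsplit]; exact List.mem_cons_self
        have hS1 : (PySem.List.remove? S (B.getD (i+1) 0)).getD S = S.erase (B.getD (i+1) 0) := by
          rw [PySem.List.remove?_eq_some_erase _ _ hB1]; rfl
        have hperm1 : (S.erase (B.getD (i+1) 0)).Perm
            (-(B.getD (i+1) 0)
              :: ((List.range' (i+2) (n-(i+2))).flatMap (fun j => [B.getD j 0, -(B.getD j 0)])
                  ++ (List.range (i+1)).flatMap (fun k => [A.getD k 0, -(A.getD k 0)]))) := by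
          have := hperm.erase (B.getD (i+1) 0)
          rwa [hsplit, List.erase_cons_head] at this
        have hB2 : -(B.getD (i+1) 0) ∈ S.erase (B.getD (i+1) 0) := by
          rw [hperm1.mem_iff]; exact List.mem_cons_self
        have hS2 : (PySem.List.remove? (S.erase (B.getD (i+1) 0)) (-(B.getD (i+1) 0))).getD
              (S.erase (B.getD (i+1) 0))
            = (S.erase (B.getD (i+1) 0)).erase (-(B.getD (i+1) 0)) := by
          rw [PySem.List.remove?_eq_some_erase _ _ hB2]; rfl
        have hperm2 : ((S.erase (B.getD (i+1) 0)).erase (-(B.getD (i+1) 0))).Perm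
            ((List.range' (i+2) (n-(i+2))).flatMap (fun j => [B.getD j 0, -(B.getD j 0)])
              ++ (List.range (i+1)).flatMap (fun k => [A.getD k 0, -(A.getD k 0)])) := by
          have := hperm1.erase (-(B.getD (i+1) 0))
          rwa [List.erase_cons_head] at this
        have hpool' : pool B A n (i+1)
            = (List.range' (i+2) (n-(i+2))).flatMap (fun j => [B.getD j 0, -(B.getD j 0)])
              ++ ((List.range (i+1)).flatMap (fun k => [A.getD k 0, -(A.getD k 0)])
                  ++ [A.getD (i+1) 0, -(A.getD (i+1) 0)]) := by
          rw [pool, List.range_succ, List.flatMap_append]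
          simp
        rw [if_pos hstep, if_pos hstep, hS1, hS2]
        rw [ih (i+1) _ (by omega) (by omega)
          (by rw [hpool']
              have := hperm2.append_right [A.getD (i+1) 0, -(A.getD (i+1) 0)]
              rwa [List.append_assoc] at this)]
        rw [show n - (i+1) = fuel from by omega]
        simp
      · have hin : i + 1 = n := by omega
        have hpool0 : pool B A n i
            = (List.range (i+1)).flatMap (fun k => [A.getD k 0, -(A.getD k 0)]) := by
          rw [pool, show n - (i+1) = 0 from by omega]
          rfl
        have hpool' : pool B A n (i+1)
            = (List.range (i+1)).flatMap (fun k => [A.getD k 0, -(A.getD k 0)])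
              ++ [A.getD (i+1) 0, -(A.getD (i+1) 0)] := by
          rw [pool, show n - (i+2) = 0 from by omega, List.range_succ, List.flatMap_append]
          simp
        rw [if_neg hstep, if_neg hstep]
        rw [ih (i+1) _ (by omega) (by omega)
          (by rw [hpool', ← hpool0]
              exact hperm.append_right _)]
        rw [show n - (i+1) = fuel from by omega]
        simp

-- the ports' negation folds, in port syntax
theorem fold_eq_enum_le (l : List Int) (c : Nat) :
    (List.range (c+1)).foldl (fun l i => l.set i (-(l.getD i 0))) l
      = (PySem.List.enumerate l).map (fun p => if p.1 ≤ (c : Int) then -p.2 else p.2) :=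
  negFold_eq_enumMap_le l c

theorem fold_eq_enum_lt (l : List Int) (k : Nat) :
    (List.range k).foldl (fun l i => l.set i (-(l.getD i 0))) l
      = (PySem.List.enumerate l).map (fun p => if p.1 < (k : Int) then -p.2 else p.2) :=
  negFold_eq_enumMap l k

theorem pool_zero (B A : List Int) (n : Nat) :
    pool B A n 0
      = (List.range' 1 (n-1)).flatMap (fun j => [B.getD j 0, -(B.getD j 0)])
          ++ [A.getD 0 0, -(A.getD 0 0)] := by
  rw [pool]
  simp [List.range_one]

theorem precheck_bridge (c1 c2 : Prop) [Decidable c1] [Decidable c2] (x y : Bool) (h : x = y) :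
    (if c1 then false else if c2 then false else x)
      = (if decide c1 || decide c2 then false else y) := by
  by_cases h1 : c1 <;> by_cases h2 : c2 <;> simp [h1, h2, h]

theorem main_bridge (B A : List Int) (n : Nat) :
    (List.range n).all (bodyA B A n)
      = loopB B A n 0
          ((List.range' 1 (n-1)).flatMap (fun j => [B.getD j 0, -(B.getD j 0)])
            ++ [A.getD 0 0, -(A.getD 0 0)]) := by
  rw [loopB_eq B A n n 0 _ (by omega) (by omega) (by rw [pool_zero]), List.range_eq_range',
    Nat.sub_zero]

-- ===== VERDICT (by name: the statement is the Claim_ definition above) =====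
theorem colreq_spec : Claim_equal_colreq := by
  intro b a _ hpre
  unfold Spec_colreq colreq colreq_alt
  by_cases hlen : a.length ≤ b.length
  · simp [hlen]
  · simp only [if_neg hlen]
    rw [lastIdx_eq (fun i => b.getD i 0 = (PySem.List.min? b (fun x => x)).getD 0) b.length]
    rw [lastIdx_eq (fun i => a.getD i 0 = (PySem.List.min? a (fun x => x)).getD 0) a.length]
    rw [fold_eq_enum_le, fold_eq_enum_lt]
    simp only [List.length_map, PySem.List.length_enumerate]
    exact precheck_bridge _ _ _ _ (main_bridge _ _ b.length)
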